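-- pv_equiv track=rewrite | github.com/achmegantara/Basic-Python-Programming | barisan-bertopi.py | barisanBertopi
-- ===== SOURCE A (Python) =====
-- def barisanBertopi(n, tinggi, nilai):
--     count = []
--     for i in range(n):
--         if i == 0:
--             count.append(0)
--         elif i >= 1:
--             if tinggi[i] > tinggi[i-1] or tinggi[i] == tinggi[i-1]:
--                 for x in range(i):
--                     count.append(nilai[x])
--     return sum(count)
-- ===== SOURCE B (Python) =====
-- def barisanBertopi(n, tinggi, nilai):
--     # One pass: maintain the running prefix sum of nilai and add it once
--     # per index whose height does not decrease.
--     total = 0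
--     prefix = 0
--     for i in range(1, n):
--         prefix += nilai[i - 1]
--         if tinggi[i - 1] <= tinggi[i]:
--             total += prefix
--     return total
-- ===== Notes on version B (the rewrite author's own statement) =====
-- stated objective: faster
-- what changed: Replaces the inner loop that re-appends nilai[0..i-1] into a list (then sums it) with a single pass keeping a running prefix sum that is added once per qualifying index.
-- outside the precondition, e.g. on barisanBertopi(3, [3, 2, 1], []): A returns 0, B raises IndexError
import Mathlib
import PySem

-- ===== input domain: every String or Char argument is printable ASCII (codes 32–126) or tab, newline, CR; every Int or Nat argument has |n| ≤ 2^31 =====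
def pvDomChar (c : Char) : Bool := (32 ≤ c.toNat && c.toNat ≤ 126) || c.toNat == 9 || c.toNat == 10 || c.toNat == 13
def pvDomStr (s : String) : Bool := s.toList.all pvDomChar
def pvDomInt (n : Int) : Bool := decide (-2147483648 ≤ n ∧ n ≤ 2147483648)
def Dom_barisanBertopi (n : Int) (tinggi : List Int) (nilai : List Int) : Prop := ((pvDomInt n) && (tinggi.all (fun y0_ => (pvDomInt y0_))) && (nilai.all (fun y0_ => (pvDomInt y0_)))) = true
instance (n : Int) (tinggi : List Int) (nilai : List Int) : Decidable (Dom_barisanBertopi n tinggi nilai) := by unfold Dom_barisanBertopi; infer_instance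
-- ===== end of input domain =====

-- B replaces A's O(n^2) re-append of nilai[0..i-1] per qualifying index with a
-- single O(n) pass maintaining a running prefix sum (objective: faster).


-- ===== PORT A =====
def barisanBertopi (n : Int) (tinggi : List Int) (nilai : List Int) : Int :=
  let count : List Int :=
    (PySem.List.pyRange 0 n 1).foldl (fun acc i =>
      if i = 0 then acc ++ [(0 : Int)]
      else if 1 ≤ i then
        if PySem.List.pyGetD tinggi i 0 > PySem.List.pyGetD tinggi (i-1) 0 ∨
           PySem.List.pyGetD tinggi i 0 = PySem.List.pyGetD tinggi (i-1) 0 then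
          (PySem.List.pyRange 0 i 1).foldl
            (fun acc2 x => acc2 ++ [PySem.List.pyGetD nilai x 0]) acc
        else acc
      else acc) []
  count.sum

-- ===== PORT B =====
def barisanBertopi_alt (n : Int) (tinggi : List Int) (nilai : List Int) : Int :=
  let st : Int × Int :=
    (PySem.List.pyRange 1 n 1).foldl (fun (st : Int × Int) i =>
      let pre := st.2 + PySem.List.pyGetD nilai (i-1) 0
      if PySem.List.pyGetD tinggi (i-1) 0 ≤ PySem.List.pyGetD tinggi i 0 then
        (st.1 + pre, pre)
      else (st.1, pre)) ((0 : Int), (0 : Int))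
  st.1

-- ===== PRECONDITION & SPEC =====
-- Pre_ excludes inputs where some tinggi[i]/nilai[x] access raises IndexError in A,
-- and (slightly narrower than A's exact domain, see the cite) inputs where nilai has
-- fewer than n-1 elements: A returns 0 there when no index qualifies without ever
-- reading nilai, but B's running prefix sum reads nilai[i-1] at every step and raises.
def Pre_barisanBertopi (n : Int) (tinggi : List Int) (nilai : List Int) : Prop :=
  2 ≤ n → (n ≤ (tinggi.length : Int) ∧ n - 1 ≤ (nilai.length : Int))
instance (n : Int) (tinggi : List Int) (nilai : List Int) : Decidable (Pre_barisanBertopi n tinggi nilai) := by unfold Pre_barisanBertopi; infer_instance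

def pvWitness_barisanBertopi : Int × List Int × List Int := (4, [1, 2, 2, 1], [5, 3, 7, 2])

def Spec_barisanBertopi (n : Int) (tinggi : List Int) (nilai : List Int) (out : Int) : Prop := out = barisanBertopi_alt n tinggi nilai
instance (n : Int) (tinggi : List Int) (nilai : List Int) (out : Int) : Decidable (Spec_barisanBertopi n tinggi nilai out) := by unfold Spec_barisanBertopi; infer_instance

-- ===== CLAIM (what is proved, stated in full; the proofs are below) =====
def Claim_equal_barisanBertopi : Prop := ∀ (n : Int) (tinggi : List Int) (nilai : List Int), Dom_barisanBertopi n tinggi nilai → Pre_barisanBertopi n tinggi nilai → Spec_barisanBertopi n tinggi nilai (barisanBertopi n tinggi nilai)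

-- ===== LEMMAS AND PROOFS =====

-- The two ports agree on ALL inputs (pyGetD defaults mean the ports are total);
-- the main invariant, by induction on the Nat length m of the range.
theorem bb_key (tinggi nilai : List Int) (m : Nat) :
    (((PySem.List.pyRange 0 (m : Int) 1).foldl (fun acc i =>
      if i = 0 then acc ++ [(0 : Int)]
      else if 1 ≤ i then
        if PySem.List.pyGetD tinggi i 0 > PySem.List.pyGetD tinggi (i-1) 0 ∨
           PySem.List.pyGetD tinggi i 0 = PySem.List.pyGetD tinggi (i-1) 0 then
          (PySem.List.pyRange 0 i 1).foldl
            (fun acc2 x => acc2 ++ [PySem.List.pyGetD nilai x 0]) acc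
        else acc
      else acc) []).sum
      = ((PySem.List.pyRange 1 (m : Int) 1).foldl (fun (st : Int × Int) i =>
          let pre := st.2 + PySem.List.pyGetD nilai (i-1) 0
          if PySem.List.pyGetD tinggi (i-1) 0 ≤ PySem.List.pyGetD tinggi i 0 then
            (st.1 + pre, pre)
          else (st.1, pre)) ((0 : Int), (0 : Int))).1)
    ∧ ((PySem.List.pyRange 1 (m : Int) 1).foldl (fun (st : Int × Int) i =>
          let pre := st.2 + PySem.List.pyGetD nilai (i-1) 0
          if PySem.List.pyGetD tinggi (i-1) 0 ≤ PySem.List.pyGetD tinggi i 0 then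
            (st.1 + pre, pre)
          else (st.1, pre)) ((0 : Int), (0 : Int))).2
      = ((PySem.List.pyRange 0 ((m : Int) - 1) 1).map
          (fun x => PySem.List.pyGetD nilai x 0)).sum := by
  induction m with
  | zero => simp [PySem.List.pyRange_one_eq_nil]
  | succ m ih =>
    rcases Nat.eq_zero_or_pos m with hm | hm
    · subst hm
      have h01 : PySem.List.pyRange (0:Int) 1 1 = [0] := PySem.List.pyRange_one_singleton 0
      have h11 : PySem.List.pyRange (1:Int) 1 1 = [] := PySem.List.pyRange_one_eq_nil le_rfl
      norm_num [h01, h11, PySem.List.pyRange_one_eq_nil]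
    have h1 : (1 : Int) ≤ (m : Int) := by exact_mod_cast hm
    have hA : PySem.List.pyRange 0 ((m : Int) + 1) 1
        = PySem.List.pyRange 0 (m : Int) 1 ++ [(m : Int)] :=
      PySem.List.pyRange_one_succ_right (by omega)
    have hB : PySem.List.pyRange 1 ((m : Int) + 1) 1
        = PySem.List.pyRange 1 (m : Int) 1 ++ [(m : Int)] :=
      PySem.List.pyRange_one_succ_right h1
    have hP : PySem.List.pyRange 0 (m : Int) 1
        = PySem.List.pyRange 0 ((m : Int) - 1) 1 ++ [(m : Int) - 1] := by
      have := PySem.List.pyRange_one_succ_right (show (0:Int) ≤ (m:Int) - 1 by omega)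
      simpa using this
    push_cast
    rw [hA, hB]
    rw [List.foldl_append, List.foldl_append]
    obtain ⟨ih1, ih2⟩ := ih
    have hm0 : ¬ ((m : Int) = 0) := by omega
    have hcond : (PySem.List.pyGetD tinggi (m : Int) 0 > PySem.List.pyGetD tinggi ((m : Int)-1) 0 ∨
        PySem.List.pyGetD tinggi (m : Int) 0 = PySem.List.pyGetD tinggi ((m : Int)-1) 0)
        ↔ (PySem.List.pyGetD tinggi ((m : Int)-1) 0 ≤ PySem.List.pyGetD tinggi (m : Int) 0) := by
      constructor
      · rintro (h | h) <;> omega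
      · intro h
        rcases lt_or_eq_of_le h with h' | h'
        · exact Or.inl h'
        · exact Or.inr h'.symm
    simp only [List.foldl_cons, List.foldl_nil]
    rw [PySem.List.foldl_append_singleton_eq_map]
    simp only [if_neg hm0, if_pos h1]
    constructor
    · split_ifs with hc1 hc2 hc2
      · simp only [List.sum_append, ih1]
        rw [ih2]
        conv_lhs => rw [hP]
        simp [List.sum_append]
      · exact absurd (hcond.mp hc1) hc2
      · exact absurd (hcond.mpr hc2) hc1
      · exact ih1
    · have hpre : ((PySem.List.pyRange 1 (m : Int) 1).foldl (fun (st : Int × Int) i =>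
          let pre := st.2 + PySem.List.pyGetD nilai (i-1) 0
          if PySem.List.pyGetD tinggi (i-1) 0 ≤ PySem.List.pyGetD tinggi i 0 then
            (st.1 + pre, pre)
          else (st.1, pre)) ((0 : Int), (0 : Int))).2 + PySem.List.pyGetD nilai ((m : Int)-1) 0
          = ((PySem.List.pyRange 0 (m : Int) 1).map (fun x => PySem.List.pyGetD nilai x 0)).sum := by
        rw [ih2]
        conv_rhs => rw [hP]
        simp [List.sum_append]
      have hsimp : ((m : Int) + 1 - 1) = (m : Int) := by ring
      rw [hsimp]
      split_ifs with hc
      · simpa using hpre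
      · simpa using hpre

-- ===== VERDICT (by name: the statement is the Claim_ definition above) =====
theorem barisanBertopi_spec : Claim_equal_barisanBertopi := by
  intro n tinggi nilai _ _
  unfold Spec_barisanBertopi barisanBertopi barisanBertopi_alt
  by_cases hn : n ≤ 0

  · rw [PySem.List.pyRange_one_eq_nil hn, PySem.List.pyRange_one_eq_nil (by omega : n ≤ 1)]
    simp
  · have hn' : n = ((n.toNat : Int)) := by omega
    rw [hn']
    exact (bb_key tinggi nilai n.toNat).1
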